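-- pv_equiv track=rewrite | github.com/AlainaMariaJoe/Coding-Practice | 045_Sort_character_type_AMJ.py | sort_char_str
-- ===== SOURCE A (Python) =====
-- def sort_char_str(s):
--     Upper_str = ''
--     lower_str = ''
--     space_str = ''
--     others_str = ''
--     for i in s:
--         if i.isupper():
--             Upper_str += i
--         elif i.islower():
--             lower_str += i
--         elif i.isspace():
--             space_str += i
--         else:
--             others_str += i
--     return Upper_str + lower_str + space_str + others_str
-- ===== SOURCE B (Python) =====
-- def sort_char_str(s):
--     def rank(c):
--         if c.isupper():
--             return 0
--         if c.islower():
--             return 1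
--         if c.isspace():
--             return 2
--         return 3
--     return ''.join(sorted(s, key=rank))
-- ===== Notes on version B (the rewrite author's own statement) =====
-- stated objective: idiomatic
-- what changed: Replaces the four explicit string accumulators and manual concatenation with a single rank key function and Python's stable sorted(), relying on sort stability to keep within-class order.
import Mathlib
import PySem

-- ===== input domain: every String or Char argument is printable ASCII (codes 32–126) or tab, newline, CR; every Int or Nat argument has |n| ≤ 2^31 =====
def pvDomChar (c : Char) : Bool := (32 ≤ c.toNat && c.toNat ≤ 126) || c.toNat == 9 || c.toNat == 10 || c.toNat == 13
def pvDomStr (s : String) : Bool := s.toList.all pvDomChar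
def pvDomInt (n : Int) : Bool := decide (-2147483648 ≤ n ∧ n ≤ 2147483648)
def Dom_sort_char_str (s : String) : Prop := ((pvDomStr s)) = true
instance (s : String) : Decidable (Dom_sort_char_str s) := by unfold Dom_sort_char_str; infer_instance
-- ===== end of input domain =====

-- B replaces A's four explicit accumulator strings with a rank key and a stable sort (idiomatic).

-- ===== PORT A =====
-- one step of A's loop: append the character to the accumulator of its class
def pvStepA (acc : List Char × List Char × List Char × List Char) (i : Char) :
    List Char × List Char × List Char × List Char :=
  if PySem.Chars.isupper i then (acc.1 ++ [i], acc.2.1, acc.2.2.1, acc.2.2.2)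
  else if PySem.Chars.islower i then (acc.1, acc.2.1 ++ [i], acc.2.2.1, acc.2.2.2)
  else if PySem.Chars.isspace i then (acc.1, acc.2.1, acc.2.2.1 ++ [i], acc.2.2.2)
  else (acc.1, acc.2.1, acc.2.2.1, acc.2.2.2 ++ [i])

def sort_char_str (s : String) : String :=
  let st := s.toList.foldl pvStepA ([], [], [], [])
  String.ofList (st.1 ++ st.2.1 ++ st.2.2.1 ++ st.2.2.2)

-- ===== PORT B =====
-- rank(c): 0 upper, 1 lower, 2 space, 3 other (same predicate order as A's elif chain)
def pvRank (c : Char) : Int :=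
  if PySem.Chars.isupper c then 0
  else if PySem.Chars.islower c then 1
  else if PySem.Chars.isspace c then 2
  else 3

-- ''.join(sorted(s, key=rank))
def sort_char_str_alt (s : String) : String :=
  String.ofList (PySem.List.sorted s.toList pvRank)

-- ===== PRECONDITION & SPEC =====
def Spec_sort_char_str (s : String) (out : String) : Prop := out = sort_char_str_alt s
instance (s : String) (out : String) : Decidable (Spec_sort_char_str s out) := by unfold Spec_sort_char_str; infer_instance

-- ===== CLAIM (what is proved, stated in full; the proofs are below) =====
def Claim_equal_sort_char_str : Prop := ∀ (s : String), Dom_sort_char_str s → Spec_sort_char_str s (sort_char_str s)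

-- ===== LEMMAS AND PROOFS =====

-- the characters of xs whose rank is r, in order
def pvBucket (r : Int) (xs : List Char) : List Char := xs.filter (fun c => pvRank c == r)

theorem pvRank_of_mem_bucket {r : Int} {xs : List Char} {y : Char}
    (h : y ∈ pvBucket r xs) : pvRank y = r := by
  have := List.of_mem_filter h
  simpa using this

-- A's loop state after processing xs is exactly the four buckets of xs
theorem pvFoldlA_eq_buckets (xs : List Char) :
    xs.foldl pvStepA ([], [], [], []) =
      (pvBucket 0 xs, pvBucket 1 xs, pvBucket 2 xs, pvBucket 3 xs) := by
  induction xs using List.reverseRecOn with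
  | nil => rfl
  | append_singleton xs x ih =>
    rw [List.foldl_append, ih]
    by_cases hU : PySem.Chars.isupper x
    · simp [pvStepA, pvBucket, List.filter_append, pvRank, hU]
    · by_cases hL : PySem.Chars.islower x
      · simp [pvStepA, pvBucket, List.filter_append, pvRank, hU, hL]
      · by_cases hS : PySem.Chars.isspace x
        · simp [pvStepA, pvBucket, List.filter_append, pvRank, hU, hL, hS]
        · simp [pvStepA, pvBucket, List.filter_append, pvRank, hU, hL, hS]

-- insertion skips a prefix none of whose elements the new element must precede
theorem pvInsertBy_append_left (x : Char) (as bs : List Char)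
    (h : ∀ y ∈ as, ¬ pvRank x < pvRank y) :
    PySem.List.insertBy (fun a b => decide (pvRank a < pvRank b)) x (as ++ bs) =
      as ++ PySem.List.insertBy (fun a b => decide (pvRank a < pvRank b)) x bs := by
  induction as with
  | nil => rfl
  | cons a as ih =>
    have ha : ¬ pvRank x < pvRank a := h a (List.mem_cons_self ..)
    simp only [List.cons_append, PySem.List.insertBy]
    simp [ha, ih fun y hy => h y (List.mem_cons_of_mem _ hy)]

-- insertion at the front of a suffix every element of which the new element precedes
theorem pvInsertBy_cons_of_all (x : Char) (bs : List Char)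
    (h : ∀ y ∈ bs, pvRank x < pvRank y) :
    PySem.List.insertBy (fun a b => decide (pvRank a < pvRank b)) x bs = x :: bs := by
  cases bs with
  | nil => rfl
  | cons b bs => simp [PySem.List.insertBy, h b (List.mem_cons_self ..)]

-- the stable sort by rank is the concatenation of the four buckets
theorem pvSorted_eq_buckets (xs : List Char) :
    PySem.List.sorted xs pvRank =
      pvBucket 0 xs ++ pvBucket 1 xs ++ pvBucket 2 xs ++ pvBucket 3 xs := by
  rw [PySem.List.sorted_eq_foldl_insertBy]
  induction xs using List.reverseRecOn with
  | nil => rfl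
  | append_singleton xs x ih =>
    rw [List.foldl_append, List.foldl_cons, List.foldl_nil, ih]
    have hex : ∀ r, pvBucket r (xs ++ [x]) =
        pvBucket r xs ++ if pvRank x = r then [x] else [] := by
      intro r; simp [pvBucket, List.filter_append, List.filter_singleton]
    by_cases hU : PySem.Chars.isupper x
    · have hr : pvRank x = 0 := by simp [pvRank, hU]
      rw [List.append_assoc, List.append_assoc,
        pvInsertBy_append_left x (pvBucket 0 xs) _
          (fun y hy => by rw [pvRank_of_mem_bucket hy, hr]; omega),
        pvInsertBy_cons_of_all x _ (fun y hy => by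
          rw [hr]
          rcases List.mem_append.mp hy with h | h
          · rw [pvRank_of_mem_bucket h]; omega
          · rcases List.mem_append.mp h with h | h <;> rw [pvRank_of_mem_bucket h] <;> omega)]
      simp [hex, hr]
    · by_cases hL : PySem.Chars.islower x
      · have hr : pvRank x = 1 := by simp [pvRank, hU, hL]
        rw [List.append_assoc,
          pvInsertBy_append_left x (pvBucket 0 xs ++ pvBucket 1 xs) _
            (fun y hy => by
              rcases List.mem_append.mp hy with h | h <;>
                rw [pvRank_of_mem_bucket h, hr] <;> omega),
          pvInsertBy_cons_of_all x _ (fun y hy => by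
            rw [hr]
            rcases List.mem_append.mp hy with h | h <;> rw [pvRank_of_mem_bucket h] <;> omega)]
        simp [hex, hr]
      · by_cases hS : PySem.Chars.isspace x
        · have hr : pvRank x = 2 := by simp [pvRank, hU, hL, hS]
          rw [pvInsertBy_append_left x (pvBucket 0 xs ++ pvBucket 1 xs ++ pvBucket 2 xs) _
              (fun y hy => by
                rcases List.mem_append.mp hy with h | h
                · rcases List.mem_append.mp h with h | h <;>
                    rw [pvRank_of_mem_bucket h, hr] <;> omega
                · rw [pvRank_of_mem_bucket h, hr]; omega),
            pvInsertBy_cons_of_all x _ (fun y hy => by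
              rw [pvRank_of_mem_bucket hy, hr]; omega)]
          simp [hex, hr]
        · have hr : pvRank x = 3 := by simp [pvRank, hU, hL, hS]
          rw [PySem.List.insertBy_of_forall_not_before _ x _
              (fun y hy => by
                simp only [decide_eq_false_iff_not]
                rcases List.mem_append.mp hy with h | h
                · rcases List.mem_append.mp h with h | h
                  · rcases List.mem_append.mp h with h | h <;>
                      rw [pvRank_of_mem_bucket h, hr] <;> omega
                  · rw [pvRank_of_mem_bucket h, hr]; omega
                · rw [pvRank_of_mem_bucket h, hr]; omega)]
          simp [hex, hr]

-- ===== VERDICT (by name: the statement is the Claim_ definition above) =====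
theorem sort_char_str_spec : Claim_equal_sort_char_str := by
  intro s _
  unfold Spec_sort_char_str sort_char_str sort_char_str_alt
  rw [pvFoldlA_eq_buckets, pvSorted_eq_buckets]
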